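-- pv_equiv track=rewrite | github.com/db758/cs4300sp2020-afb75-ak2355-da388-db758-kr439 | movie_scoring.py | getTitleScore
-- ===== SOURCE A (Python) =====
-- import operator
--
-- def getTitleScore(movie_titles, keywords):
-- 	"""
-- 	Parameter: list of movie titles, list of user inputed keywords all lowercase
--
-- 	Returns: sorted list: [(movie title, score), ...]. Will be empty if no keywords
-- 					 match the words in the movie titles.
-- 	"""
--
-- 	title_dict = {}
-- 	for mov in movie_titles:
-- 		#tokenize movie title based on space
-- 		title = mov.lower().split(" ")
-- 		for word in keywords:
-- 			if word in title:
-- 				if mov in title_dict: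
-- 					title_dict[mov] += 1
-- 				else:
-- 					title_dict[mov] = 1
-- 	title_dict_sorted = sorted(title_dict.items(), key=operator.itemgetter(1))
-- 	return title_dict_sorted
-- ===== SOURCE B (Python) =====
-- import operator
--
-- def getTitleScore(movie_titles, keywords):
--     # Build a keyword frequency table once, then score each movie in one pass.
--     kw_counter = {}
--     for w in keywords:
--         kw_counter[w] = kw_counter.get(w, 0) + 1
--     title_dict = {}
--     for mov in movie_titles:
--         score = sum(kw_counter.get(t, 0) for t in set(mov.lower().split(" ")))
--         if score > 0:
--             title_dict[mov] = title_dict.get(mov, 0) + score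
--     return sorted(title_dict.items(), key=operator.itemgetter(1))
-- ===== Notes on version B (the rewrite author's own statement) =====
-- stated objective: faster
-- what changed: Builds a keyword frequency table once and scores each movie by summing counts over its distinct tokens, instead of scanning the token list for every (movie, keyword) pair.
import Mathlib
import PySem

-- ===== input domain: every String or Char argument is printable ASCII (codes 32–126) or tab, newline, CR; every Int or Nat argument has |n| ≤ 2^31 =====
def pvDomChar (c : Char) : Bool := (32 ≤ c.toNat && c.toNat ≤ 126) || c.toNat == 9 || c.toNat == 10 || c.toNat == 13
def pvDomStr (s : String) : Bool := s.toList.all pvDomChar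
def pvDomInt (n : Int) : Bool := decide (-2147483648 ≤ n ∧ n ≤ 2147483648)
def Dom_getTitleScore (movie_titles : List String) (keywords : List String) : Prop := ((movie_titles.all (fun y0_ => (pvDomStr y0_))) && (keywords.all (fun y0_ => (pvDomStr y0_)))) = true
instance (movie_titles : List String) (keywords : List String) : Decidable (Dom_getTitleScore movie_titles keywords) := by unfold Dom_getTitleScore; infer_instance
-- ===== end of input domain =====

-- B builds a keyword frequency table once and scores each movie over its distinct tokens,
-- instead of scanning the token list for every (movie, keyword) pair.

-- ===== PORT A =====
-- mov.lower().split(" "): split? is exact here since the separator " " is nonempty (split? is none only for sep = "")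
def pvTokens (mov : String) : List String :=
  (PySem.Str.split? (PySem.Str.lower mov) " ").getD []

def getTitleScore (movie_titles : List String) (keywords : List String) : List (String × Int) :=
  let title_dict := movie_titles.foldl (fun d mov =>
    let title := pvTokens mov
    keywords.foldl (fun d word =>
      if title.contains word then
        if d.contains mov then d.insert mov (d.getD mov 0 + 1)
        else d.insert mov 1
      else d) d) PySem.Dict.empty
  PySem.List.sorted title_dict.items (fun p => p.2) false

-- ===== PORT B =====
def getTitleScore_alt (movie_titles : List String) (keywords : List String) : List (String × Int) :=
  let kw_counter : PySem.Dict String Int :=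
    keywords.foldl (fun d w => d.insert w (d.getD w 0 + 1)) PySem.Dict.empty
  let title_dict := movie_titles.foldl (fun d mov =>
    let score := ((PySem.Set.ofList (pvTokens mov)).map (fun t => kw_counter.getD t 0)).sum
    if score > 0 then d.insert mov (d.getD mov 0 + score) else d) PySem.Dict.empty
  PySem.List.sorted title_dict.items (fun p => p.2) false

-- ===== PRECONDITION & SPEC =====
def Spec_getTitleScore (movie_titles : List String) (keywords : List String) (out : List (String × Int)) : Prop := out = getTitleScore_alt movie_titles keywords
instance (movie_titles : List String) (keywords : List String) (out : List (String × Int)) : Decidable (Spec_getTitleScore movie_titles keywords out) := by unfold Spec_getTitleScore; infer_instance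

-- ===== CLAIM (what is proved, stated in full; the proofs are below) =====
def Claim_equal_getTitleScore : Prop := ∀ (movie_titles : List String) (keywords : List String), Dom_getTitleScore movie_titles keywords → Spec_getTitleScore movie_titles keywords (getTitleScore movie_titles keywords)

-- ===== LEMMAS AND PROOFS =====

-- sum over a Nodup list of indicator values = membership indicator
theorem pv_sum_indicator (w : String) (S : List String) (h : S.Nodup) :
    (S.map (fun t => if w = t then (1 : Int) else 0)).sum = if w ∈ S then 1 else 0 := by
  induction S with
  | nil => simp
  | cons a S ih =>
    simp only [List.nodup_cons] at h
    simp only [List.map_cons, List.sum_cons, ih h.2, List.mem_cons]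
    by_cases hw : w = a
    · subst hw
      simp [h.1]
    · simp [hw]

-- the distinct-token counter sum equals the number of matching keywords
theorem pv_score_eq (tokens keywords : List String) :
    ((PySem.Set.ofList tokens).map (fun t => (keywords.count t : Int))).sum
      = (keywords.countP (fun w => tokens.contains w) : Int) := by
  induction keywords with
  | nil => simp
  | cons w ws ih =>
    have hsum : ((PySem.Set.ofList tokens).map (fun t => ((w :: ws).count t : Int))).sum
        = ((PySem.Set.ofList tokens).map (fun t => (ws.count t : Int))).sum
          + ((PySem.Set.ofList tokens).map (fun t => if w = t then (1 : Int) else 0)).sum := by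
      rw [← List.sum_map_add]
      apply congrArg
      apply List.map_congr_left
      intro t _
      simp only [List.count_cons]
      by_cases hw : w = t
      · subst hw
        simp only [beq_self_eq_true, if_true]
        push_cast
        ring
      · have h1 : (w == t) = false := beq_false_of_ne hw
        have h2 : (t == w) = false := beq_false_of_ne fun a => hw a.symm
        simp [h1, hw]
    rw [hsum, ih, pv_sum_indicator w _ (PySem.Set.nodup_ofList tokens)]
    have hmem : w ∈ PySem.Set.ofList tokens ↔ w ∈ tokens := PySem.Set.mem_ofList tokens w
    simp only [List.countP_cons]
    by_cases hc : w ∈ tokens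
    · have hct : tokens.contains w = true := List.contains_iff_mem.mpr hc
      rw [hct, if_pos (hmem.mpr hc)]
      simp
      try ring
    · have hct : tokens.contains w = false := by
        simpa using fun h => hc (List.contains_iff_mem.mp h)
      rw [hct, if_neg (fun h => hc (hmem.mp h))]
      simp

-- A's per-keyword branch is one insert
theorem pv_stepA_eq (d : PySem.Dict String Int) (mov : String) :
    (if d.contains mov then d.insert mov (d.getD mov 0 + 1) else d.insert mov 1)
      = d.insert mov (d.getD mov 0 + 1) := by
  by_cases h : d.contains mov = true
  · simp [h]
  · have h' : d.contains mov = false := by simpa using h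
    rw [h', if_neg (by simp), PySem.Dict.getD_of_not_contains d 0 h']
    norm_num

-- A's inner keyword loop collapses to B's single conditional insert
theorem pv_inner_eq (tokens : List String) (mov : String) (keywords : List String)
    (s : Int) (hs : s = (keywords.countP (fun w => tokens.contains w) : Int))
    (d : PySem.Dict String Int) :
    keywords.foldl (fun d word =>
        if tokens.contains word then
          if d.contains mov then d.insert mov (d.getD mov 0 + 1)
          else d.insert mov 1
        else d) d
      = (if s > 0 then d.insert mov (d.getD mov 0 + s) else d) := by
  subst hs
  induction keywords generalizing d with
  | nil => simp
  | cons w ws ih =>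
    simp only [List.foldl_cons, List.countP_cons]
    by_cases hw : tokens.contains w = true
    · rw [if_pos hw, pv_stepA_eq, ih]
      set c : Nat := ws.countP (fun w => tokens.contains w) with hcdef
      rw [hw]
      simp only [if_true]
      by_cases h0 : (c : Int) > 0
      · rw [if_pos h0, PySem.Dict.insert_insert_self, PySem.Dict.getD_insert_self]
        rw [if_pos (by push_cast; omega)]
        push_cast
        ring_nf
      · have hc0 : c = 0 := by omega
        rw [if_neg h0, if_pos (by push_cast; omega)]
        simp [hc0]
    · have hw' : tokens.contains w = false := by simpa using hw
      rw [hw']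
      simp only [Bool.false_eq_true, if_false, Nat.add_zero]
      exact ih d

-- B's per-token counter lookup is the keyword count
theorem pv_counter_getD (keywords : List String) (t : String) :
    (keywords.foldl (fun d w => d.insert w (d.getD w 0 + 1)) PySem.Dict.empty).getD t 0
      = (keywords.count t : Int) := by
  rw [PySem.Dict.getD_foldl_insert_add_one]
  simp

-- the two dict-building folds agree
theorem pv_dict_eq (movie_titles keywords : List String) (tk : String → List String) :
    movie_titles.foldl (fun d mov =>
      keywords.foldl (fun d word =>
        if (tk mov).contains word then
          if d.contains mov then d.insert mov (d.getD mov 0 + 1)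
          else d.insert mov 1
        else d) d) (PySem.Dict.empty : PySem.Dict String Int)
    = movie_titles.foldl (fun d mov =>
        if ((PySem.Set.ofList (tk mov)).map (fun t =>
            (keywords.foldl (fun d w => d.insert w (d.getD w 0 + 1)) (PySem.Dict.empty : PySem.Dict String Int)).getD t 0)).sum > 0
        then d.insert mov (d.getD mov 0 + ((PySem.Set.ofList (tk mov)).map (fun t =>
            (keywords.foldl (fun d w => d.insert w (d.getD w 0 + 1)) (PySem.Dict.empty : PySem.Dict String Int)).getD t 0)).sum)
        else d) PySem.Dict.empty := by
  refine PySem.List.foldl_congr_mem movie_titles _ _ PySem.Dict.empty ?_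
  intro d mov _
  have hscore : ((PySem.Set.ofList (tk mov)).map (fun t =>
      (keywords.foldl (fun d w => d.insert w (d.getD w 0 + 1)) (PySem.Dict.empty : PySem.Dict String Int)).getD t 0)).sum
      = ((keywords.countP (fun w => (tk mov).contains w) : Nat) : Int) := by
    have : ∀ t, (keywords.foldl (fun d w => d.insert w (d.getD w 0 + 1)) (PySem.Dict.empty : PySem.Dict String Int)).getD t 0
        = (keywords.count t : Int) := pv_counter_getD keywords
    simp only [this]
    exact pv_score_eq (tk mov) keywords
  exact pv_inner_eq (tk mov) mov keywords _ hscore d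

-- ===== VERDICT (by name: the statement is the Claim_ definition above) =====
set_option maxHeartbeats 1000000 in
theorem getTitleScore_spec : Claim_equal_getTitleScore := by
  intro movie_titles keywords _
  show getTitleScore movie_titles keywords = getTitleScore_alt movie_titles keywords
  exact congrArg (fun d : PySem.Dict String Int => PySem.List.sorted d.items (fun p => p.2) false)
    (pv_dict_eq movie_titles keywords pvTokens)
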